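-- pv_equiv track=rewrite | github.com/keisukee/atcoder | ABC190/contestC.py | get_meet_requirement_count
-- ===== SOURCE A (Python) =====
-- def get_meet_requirement_count(conditions, choices):
--     max_count = 0
--     for i in range(2**len(choices)):
--         balls = set()
--         for j in range(len(choices)):
--             if (i >> j & 1):
--                 balls.add(choices[j][1])
--             else:
--                 balls.add(choices[j][0])
--
--         current_count = 0
--         for condition in conditions:
--             if condition[0] in balls and condition[1] in balls:
--                 current_count += 1
--         max_count = max(max_count, current_count)
--     return max_count
-- ===== SOURCE B (Python) =====
-- def get_meet_requirement_count(conditions, choices):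
--     def dfs(index, balls):
--         if index == len(choices):
--             return sum(1 for c in conditions if c[0] in balls and c[1] in balls)
--         a, b = choices[index]
--         return max(dfs(index + 1, balls | {a}),
--                    dfs(index + 1, balls | {b}))
--     return dfs(0, set())
-- ===== Notes on version B (the rewrite author's own statement) =====
-- stated objective: alternative
-- what changed: Replaced the integer-bitmask enumeration (loop over range(2**k) with bit tests rebuilding a set per mask) by a recursive backtracking DFS over the choices list that extends the set incrementally and counts at the leaves, taking the max over the two branches.
import Mathlib
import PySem

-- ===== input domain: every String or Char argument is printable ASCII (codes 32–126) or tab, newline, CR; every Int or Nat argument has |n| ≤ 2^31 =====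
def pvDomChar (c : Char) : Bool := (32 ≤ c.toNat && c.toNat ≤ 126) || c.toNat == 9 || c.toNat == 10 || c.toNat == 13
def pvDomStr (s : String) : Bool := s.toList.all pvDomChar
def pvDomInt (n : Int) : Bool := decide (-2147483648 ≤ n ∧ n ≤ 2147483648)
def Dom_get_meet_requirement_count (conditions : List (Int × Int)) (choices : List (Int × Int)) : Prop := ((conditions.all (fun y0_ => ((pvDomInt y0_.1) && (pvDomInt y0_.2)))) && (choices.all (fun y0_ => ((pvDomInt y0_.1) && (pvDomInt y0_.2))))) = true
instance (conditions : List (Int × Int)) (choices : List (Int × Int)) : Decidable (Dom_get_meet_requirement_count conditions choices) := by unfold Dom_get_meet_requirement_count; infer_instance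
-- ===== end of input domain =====

-- B replaces A's integer-bitmask enumeration by a recursive backtracking DFS over the
-- choices list (alternative decomposition, same exact result; no speed claim).

-- ===== PORT A =====
-- Python 'i >> j & 1' is '(i >>> j.toNat) & 1' (j ≥ 0 comes from range; the Int-valued
-- shift amount is the same shift); 'choices[j]' is always in range here, so
-- 'pyGet? … |>.getD (0,0)' is exact.
def get_meet_requirement_count (conditions : List (Int × Int)) (choices : List (Int × Int)) : Int :=
  (PySem.List.pyRange 0 ((2 : Int) ^ choices.length) 1).foldl
    (fun max_count i =>
      let balls : PySem.Set Int :=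
        (PySem.List.pyRange 0 (choices.length : Int) 1).foldl
          (fun balls j =>
            if PySem.Int.band (i >>> (j.toNat : Int)) 1 ≠ 0 then
              balls.add ((PySem.List.pyGet? choices j).getD (0, 0)).2
            else
              balls.add ((PySem.List.pyGet? choices j).getD (0, 0)).1)
          PySem.Set.empty
      let current_count : Int :=
        conditions.foldl
          (fun current_count condition =>
            if balls.contains condition.1 && balls.contains condition.2 then
              current_count + 1
            else current_count) 0
      max max_count current_count)
    0

-- ===== PORT B =====
-- dfs(index, balls): recursion over the suffix of choices; at a leaf,
-- 'sum(1 for c in conditions if …)' is the length of the filtered list.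
def pvDfs (conditions : List (Int × Int)) (balls : PySem.Set Int) : List (Int × Int) → Int
  | [] => ((conditions.filter fun c => balls.contains c.1 && balls.contains c.2).length : Int)
  | c :: rest =>
      max (pvDfs conditions (balls.add c.1) rest) (pvDfs conditions (balls.add c.2) rest)

def get_meet_requirement_count_alt (conditions : List (Int × Int)) (choices : List (Int × Int)) : Int :=
  pvDfs conditions PySem.Set.empty choices

-- ===== PRECONDITION & SPEC =====
def Spec_get_meet_requirement_count (conditions : List (Int × Int)) (choices : List (Int × Int)) (out : Int) : Prop := out = get_meet_requirement_count_alt conditions choices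
instance (conditions : List (Int × Int)) (choices : List (Int × Int)) (out : Int) : Decidable (Spec_get_meet_requirement_count conditions choices out) := by unfold Spec_get_meet_requirement_count; infer_instance

-- ===== CLAIM (what is proved, stated in full; the proofs are below) =====
def Claim_equal_get_meet_requirement_count : Prop := ∀ (conditions : List (Int × Int)) (choices : List (Int × Int)), Dom_get_meet_requirement_count conditions choices → Spec_get_meet_requirement_count conditions choices (get_meet_requirement_count conditions choices)

-- ===== LEMMAS AND PROOFS =====

-- the count at a leaf
def pvCnt (conditions : List (Int × Int)) (balls : PySem.Set Int) : Int :=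
  ((conditions.filter fun c => balls.contains c.1 && balls.contains c.2).length : Int)

-- the set an assignment m (read in binary, least bit first) selects from a suffix of choices
def pvAddBits (s : PySem.Set Int) : List (Int × Int) → Nat → PySem.Set Int
  | [], _ => s
  | c :: r, m => pvAddBits (s.add (if m % 2 = 1 then c.2 else c.1)) r (m / 2)

-- A's inner j-loop, with the index already a Nat and the bit test in divide/mod form
def pvStep (cs : List (Int × Int)) (m : Nat) (b : PySem.Set Int) (k : Nat) : PySem.Set Int :=
  if m / 2 ^ k % 2 = 1 then b.add (cs[k]?.getD (0, 0)).2 else b.add (cs[k]?.getD (0, 0)).1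

lemma pvStep_foldl_eq_addBits (cs : List (Int × Int)) :
    ∀ (m : Nat) (s : PySem.Set Int),
      (List.range cs.length).foldl (pvStep cs m) s = pvAddBits s cs m := by
  induction cs with
  | nil => intro m s; rfl
  | cons c r ih =>
      intro m s
      have hshift : ∀ (b : PySem.Set Int) (k : Nat),
          pvStep (c :: r) m b (Nat.succ k) = pvStep r (m / 2) b k := by
        intro b k
        simp only [pvStep, List.getElem?_cons_succ, Nat.succ_eq_add_one, pow_succ',
          Nat.div_div_eq_div_mul]
      simp only [List.length_cons, List.range_succ_eq_map, List.foldl_cons, List.foldl_map,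
        hshift]
      have h0 : pvStep (c :: r) m s 0 = s.add (if m % 2 = 1 then c.2 else c.1) := by
        simp only [pvStep, pow_zero, Nat.div_one, List.getElem?_cons_zero, Option.getD_some]
        split_ifs <;> rfl
      rw [h0, ih]
      rfl

-- A's inner loop literally, for a nonnegative mask i, equals pvAddBits
lemma pvInner_eq_addBits (cs : List (Int × Int)) (i : Int) (h0 : 0 ≤ i) :
    (PySem.List.pyRange 0 (cs.length : Int) 1).foldl
      (fun balls j =>
        if PySem.Int.band (i >>> (j.toNat : Int)) 1 ≠ 0 then
          balls.add ((PySem.List.pyGet? cs j).getD (0, 0)).2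
        else
          balls.add ((PySem.List.pyGet? cs j).getD (0, 0)).1)
      PySem.Set.empty = pvAddBits PySem.Set.empty cs i.toNat := by
  have hi : i = ((i.toNat : Nat) : Int) := (Int.toNat_of_nonneg h0).symm
  have hrange : PySem.List.pyRange 0 (cs.length : Int) 1 =
      (List.range cs.length).map (fun k : Nat => ((k : Int))) := by
    rw [PySem.List.pyRange_one]
    simp
  rw [hrange, List.foldl_map]
  rw [← pvStep_foldl_eq_addBits cs i.toNat PySem.Set.empty]
  apply PySem.List.foldl_congr_mem
  intro b k hk
  have hsh : i >>> ((((k : Int)).toNat : Nat) : Int) = ((i.toNat >>> k : Nat) : Int) := by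
    rw [Int.toNat_natCast]
    conv_lhs => rw [hi]
    rw [Int.shiftRight_natCast]
  have hband : PySem.Int.band (((i.toNat >>> k : Nat) : Int)) 1 =
      (((i.toNat >>> k) &&& 1 : Nat) : Int) := by
    exact_mod_cast PySem.Int.band_natCast (i.toNat >>> k) 1
  have hbit : (i.toNat >>> k) &&& 1 = i.toNat / 2 ^ k % 2 := by
    rw [Nat.shiftRight_eq_div_pow, Nat.and_one_is_mod]
  have hget : PySem.List.pyGet? cs ((k : Int)) = cs[k]? := by
    simp [PySem.List.pyGet?_natCast]
  rw [hsh, hband, hbit, hget]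
  simp only [pvStep, ne_eq, Int.natCast_eq_zero]
  split_ifs with h1 h2 h2 <;> first | rfl | (exfalso; omega)

-- A's per-mask value
def pvF (conditions : List (Int × Int)) (cs : List (Int × Int)) (i : Int) : Int :=
  pvCnt conditions (pvAddBits PySem.Set.empty cs i.toNat)

lemma pvCnt_nonneg (conditions : List (Int × Int)) (b : PySem.Set Int) : 0 ≤ pvCnt conditions b :=
  Int.natCast_nonneg _

lemma pvCnt_foldl (conditions : List (Int × Int)) (b : PySem.Set Int) :
    conditions.foldl
      (fun current_count condition =>
        if b.contains condition.1 && b.contains condition.2 then current_count + 1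
        else current_count) (0 : Int) = pvCnt conditions b := by
  rw [PySem.List.foldl_count_if]
  simp [pvCnt, List.countP_eq_length_filter]

-- the DFS dominates every mask's count …
lemma pvDfs_ge (conditions : List (Int × Int)) :
    ∀ (cs : List (Int × Int)) (s : PySem.Set Int) (m : Nat), m < 2 ^ cs.length →
      pvCnt conditions (pvAddBits s cs m) ≤ pvDfs conditions s cs := by
  intro cs
  induction cs with
  | nil => intro s m _; exact le_of_eq rfl
  | cons c r ih =>
      intro s m hm
      have hp : (2 : Nat) ^ (c :: r).length = 2 * 2 ^ r.length := by
        simp [pow_succ']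
      have hm2 : m / 2 < 2 ^ r.length := by omega
      by_cases h : m % 2 = 1
      · calc pvCnt conditions (pvAddBits s (c :: r) m)
            = pvCnt conditions (pvAddBits (s.add c.2) r (m / 2)) := by
              simp [pvAddBits, h]
          _ ≤ pvDfs conditions (s.add c.2) r := ih (s.add c.2) (m / 2) hm2
          _ ≤ pvDfs conditions s (c :: r) := le_max_right _ _
      · calc pvCnt conditions (pvAddBits s (c :: r) m)
            = pvCnt conditions (pvAddBits (s.add c.1) r (m / 2)) := by
              simp [pvAddBits, h]
          _ ≤ pvDfs conditions (s.add c.1) r := ih (s.add c.1) (m / 2) hm2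
          _ ≤ pvDfs conditions s (c :: r) := le_max_left _ _

-- … and is attained by some mask
lemma pvDfs_attained (conditions : List (Int × Int)) :
    ∀ (cs : List (Int × Int)) (s : PySem.Set Int),
      ∃ m : Nat, m < 2 ^ cs.length ∧
        pvDfs conditions s cs = pvCnt conditions (pvAddBits s cs m) := by
  intro cs
  induction cs with
  | nil => intro s; exact ⟨0, by norm_num, rfl⟩
  | cons c r ih =>
      intro s
      obtain ⟨m1, hm1, e1⟩ := ih (s.add c.1)
      obtain ⟨m2, hm2, e2⟩ := ih (s.add c.2)
      have hp : (2 : Nat) ^ (c :: r).length = 2 * 2 ^ r.length := by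
        simp [pow_succ']
      rcases le_total (pvDfs conditions (s.add c.1) r) (pvDfs conditions (s.add c.2) r) with
        hle | hle
      · refine ⟨2 * m2 + 1, by omega, ?_⟩
        have h1 : (2 * m2 + 1) % 2 = 1 := by omega
        have h2 : (2 * m2 + 1) / 2 = m2 := by omega
        have hab : pvAddBits s (c :: r) (2 * m2 + 1) = pvAddBits (s.add c.2) r m2 := by
          simp [pvAddBits, h2]
        simp only [pvDfs, hab]
        rw [max_eq_right hle, e2]
      · refine ⟨2 * m1, by omega, ?_⟩
        have h1 : ¬ (2 * m1) % 2 = 1 := by omega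
        have h2 : (2 * m1) / 2 = m1 := by omega
        have hab : pvAddBits s (c :: r) (2 * m1) = pvAddBits (s.add c.1) r m1 := by
          simp [pvAddBits, h2]
        simp only [pvDfs, hab]
        rw [max_eq_left hle, e1]

-- A's port as a running max of pvF over the mask range
lemma pvA_eq_foldl (conditions : List (Int × Int)) (choices : List (Int × Int)) :
    get_meet_requirement_count conditions choices =
      ((PySem.List.pyRange 0 ((2 : Int) ^ choices.length) 1).map
        (pvF conditions choices)).foldl max 0 := by
  rw [List.foldl_map]
  unfold get_meet_requirement_count
  apply PySem.List.foldl_congr_mem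
  intro mc i hi
  have h0i : 0 ≤ i := ((PySem.List.mem_pyRange_one).1 hi).1
  simp only []
  rw [pvCnt_foldl]
  unfold pvF
  rw [pvInner_eq_addBits choices i h0i]

theorem get_meet_requirement_count_spec_aux (conditions : List (Int × Int))
    (choices : List (Int × Int)) :
    get_meet_requirement_count conditions choices =
      get_meet_requirement_count_alt conditions choices := by
  rw [pvA_eq_foldl]
  set l := (PySem.List.pyRange 0 ((2 : Int) ^ choices.length) 1).map (pvF conditions choices)
    with hl
  have hcast : ((2 : Int) ^ choices.length) = (((2 ^ choices.length : Nat) : Int)) := by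
    push_cast; ring
  apply le_antisymm
  · -- A ≤ B : A is 0 or some pvF i, each ≤ the DFS value
    rcases PySem.List.foldl_max_mem l 0 with h | h
    · rw [h]
      obtain ⟨m, _, e⟩ := pvDfs_attained conditions choices PySem.Set.empty
      unfold get_meet_requirement_count_alt
      rw [e]; exact pvCnt_nonneg _ _
    · obtain ⟨i, hi, hfi⟩ := List.mem_map.1 h
      obtain ⟨h0i, hlt⟩ := (PySem.List.mem_pyRange_one).1 hi
      have hmlt : i.toNat < 2 ^ choices.length := by
        rw [hcast] at hlt; omega
      rw [← hfi]
      exact pvDfs_ge conditions choices PySem.Set.empty i.toNat hmlt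
  · -- B ≤ A : the DFS value is pvF of some mask, which is ≤ the running max
    obtain ⟨m, hm, e⟩ := pvDfs_attained conditions choices PySem.Set.empty
    unfold get_meet_requirement_count_alt
    rw [e]
    have hmem : ((m : Int)) ∈ PySem.List.pyRange 0 ((2 : Int) ^ choices.length) 1 := by
      rw [PySem.List.mem_pyRange_one]
      constructor
      · exact Int.natCast_nonneg m
      · rw [hcast]; exact_mod_cast hm
    have hmemf : pvF conditions choices ((m : Int)) ∈ l :=
      List.mem_map.2 ⟨(m : Int), hmem, rfl⟩
    have := (PySem.List.le_foldl_max l 0).2 _ hmemf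
    have hf : pvF conditions choices ((m : Int)) =
        pvCnt conditions (pvAddBits PySem.Set.empty choices m) := by
      unfold pvF; simp
    rw [hf] at this
    exact this

-- ===== VERDICT (by name: the statement is the Claim_ definition above) =====
theorem get_meet_requirement_count_spec : Claim_equal_get_meet_requirement_count := by
  intro conditions choices _
  exact get_meet_requirement_count_spec_aux conditions choices
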